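-- pv_equiv track=rewrite | github.com/pooaras/projectFiles | detectsimilarAnNotify copy.py | rolling_hash
-- ===== SOURCE A (Python) =====
-- def rolling_hash(text, window_size):
--     """
--     Compute rolling hash values for all windows of size `window_size`.
--     """
--     hash_values = []
--     text_len = len(text)
--     prime = 101  # Choose a prime number
--     modulus = 2**32  # Typically a large prime number
--     hash_value = 0
--     for i in range(window_size):
--         hash_value = (hash_value * prime + ord(text[i])) % modulus
--     hash_values.append(hash_value)
--
--     for i in range(1, text_len - window_size + 1):
--         hash_value = (hash_value * prime - ord(text[i - 1]) * pow(prime, window_size, modulus) + ord(text[i + window_size - 1])) % modulus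
--         hash_values.append(hash_value)
--
--     return hash_values
-- ===== SOURCE B (Python) =====
-- def rolling_hash(text, window_size):
--     """
--     Compute rolling hash values for all windows of size `window_size`.
--     Same values as A, but via a precomputed prefix-Horner-hash table:
--     each window hash is (pref[i+w] - pref[i]*prime**w) % modulus,
--     independent of the previous window's hash.
--     """
--     hash_values = []
--     text_len = len(text)
--     prime = 101
--     modulus = 2**32
--     # pref[k] = Horner hash of text[:k]
--     pref = [0]
--     h = 0
--     for k in range(text_len):
--         h = (h * prime + ord(text[k])) % modulus
--         pref.append(h)
--     pw = pow(prime, window_size, modulus)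
--     hash_values.append((pref[window_size] - pref[0] * pw) % modulus)
--     for i in range(1, text_len - window_size + 1):
--         hash_values.append((pref[i + window_size] - pref[i] * pw) % modulus)
--     return hash_values
-- ===== Notes on version B (the rewrite author's own statement) =====
-- stated objective: faster
-- what changed: Replaces A's carried rolling update (previous hash times prime, subtract outgoing char times pow(prime,window_size,modulus), add incoming char) by a precomputed prefix-Horner-hash table with each window hash taken as (pref[i+w]-pref[i]*prime^w) mod 2^32, independent of the previous window; A recomputes the modular pow on every iteration while B computes it once.
import Mathlib
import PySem

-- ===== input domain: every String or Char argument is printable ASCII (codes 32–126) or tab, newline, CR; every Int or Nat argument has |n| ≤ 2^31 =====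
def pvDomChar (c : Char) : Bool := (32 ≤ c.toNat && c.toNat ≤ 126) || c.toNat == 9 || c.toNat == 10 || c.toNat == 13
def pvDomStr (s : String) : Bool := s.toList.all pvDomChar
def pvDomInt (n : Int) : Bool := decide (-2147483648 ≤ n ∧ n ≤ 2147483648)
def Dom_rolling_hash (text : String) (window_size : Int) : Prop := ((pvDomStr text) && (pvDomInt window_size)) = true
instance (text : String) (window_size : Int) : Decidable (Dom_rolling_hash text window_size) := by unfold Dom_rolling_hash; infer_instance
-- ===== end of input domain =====

-- B replaces A's carried rolling update (previous hash, subtract outgoing char * prime^w) by a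
-- precomputed prefix-Horner-hash table: each window hash is (pref[i+w] - pref[i]*prime^w) % 2^32.

-- ord(text[i]): exact wherever the index is in range (Pre_ guarantees every access is);
-- where Python would raise IndexError the default is irrelevant to the claim.
def pvOrd (text : String) (i : Int) : Int :=
  (((PySem.Str.pyGet? text i).getD (Char.ofNat 0)).toNat : Int)

-- ===== PORT A =====
def rolling_hash (text : String) (window_size : Int) : List Int :=
  -- hash_value = 0; for i in range(window_size): hash_value = (hash_value*prime + ord(text[i])) % modulus
  let hash_value : Int :=
    (PySem.List.pyRange 0 window_size 1).foldl
      (fun h i => PySem.Int.mod (h * 101 + pvOrd text i) (2 ^ 32)) 0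
  -- hash_values.append(hash_value); then the rolling loop over range(1, text_len - window_size + 1);
  -- pow(prime, window_size, modulus): exponent .toNat is exact for window_size ≥ 0 (Pre_)
  ((PySem.List.pyRange 1 (PySem.Str.len text - window_size + 1) 1).foldl
      (fun (st : List Int × Int) i =>
        let h := PySem.Int.mod
          (st.2 * 101 - pvOrd text (i - 1) * PySem.Int.powMod 101 window_size.toNat (2 ^ 32)
            + pvOrd text (i + window_size - 1)) (2 ^ 32)
        (st.1 ++ [h], h))
      ([hash_value], hash_value)).1

-- ===== PORT B =====
def rolling_hash_alt (text : String) (window_size : Int) : List Int :=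
  -- pref = [0]; h = 0; for k in range(text_len): h = (h*prime + ord(text[k])) % modulus; pref.append(h)
  let pref : List Int :=
    ((PySem.List.pyRange 0 (PySem.Str.len text) 1).foldl
      (fun (st : List Int × Int) k =>
        let h := PySem.Int.mod (st.2 * 101 + pvOrd text k) (2 ^ 32)
        (st.1 ++ [h], h)) ([0], 0)).1
  -- pw = pow(prime, window_size, modulus): exponent .toNat exact for window_size ≥ 0 (Pre_)
  let pw : Int := PySem.Int.powMod 101 window_size.toNat (2 ^ 32)
  -- append (pref[window_size] - pref[0]*pw) % modulus, then
  -- for i in range(1, text_len - window_size + 1): append (pref[i+window_size] - pref[i]*pw) % modulus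
  -- (pref[·] via pyGetD: indices are in range under Pre_)
  PySem.Int.mod
      (PySem.List.pyGetD pref window_size 0 - PySem.List.pyGetD pref 0 0 * pw) (2 ^ 32)
    :: (PySem.List.pyRange 1 (PySem.Str.len text - window_size + 1) 1).map
        (fun i => PySem.Int.mod
          (PySem.List.pyGetD pref (i + window_size) 0 - PySem.List.pyGetD pref i 0 * pw) (2 ^ 32))

-- ===== PRECONDITION & SPEC =====
-- A raises IndexError whenever window_size > len(text) (seed loop) and whenever
-- window_size < 0 (the rolling loop then runs past the end of text); Pre_ is exactly
-- the inputs on which A returns normally.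
def Pre_rolling_hash (text : String) (window_size : Int) : Prop :=
  0 ≤ window_size ∧ window_size ≤ PySem.Str.len text
instance (text : String) (window_size : Int) : Decidable (Pre_rolling_hash text window_size) := by
  unfold Pre_rolling_hash; infer_instance

def pvWitness_rolling_hash : String × Int := ("abcde", 2)

def Spec_rolling_hash (text : String) (window_size : Int) (out : List Int) : Prop := out = rolling_hash_alt text window_size
instance (text : String) (window_size : Int) (out : List Int) : Decidable (Spec_rolling_hash text window_size out) := by unfold Spec_rolling_hash; infer_instance

-- ===== CLAIM (what is proved, stated in full; the proofs are below) =====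
def Claim_equal_rolling_hash : Prop := ∀ (text : String) (window_size : Int), Dom_rolling_hash text window_size → Pre_rolling_hash text window_size → Spec_rolling_hash text window_size (rolling_hash text window_size)

-- ===== LEMMAS AND PROOFS =====

lemma pvMod_eq (a : Int) : PySem.Int.mod a (2 ^ 32) = a % 2 ^ 32 :=
  PySem.Int.mod_eq_emod_of_pos (by norm_num)

lemma pvModEq_seed (a c : Int) : (a % 2 ^ 32 * 101 + c) % 2 ^ 32 = (a * 101 + c) % 2 ^ 32 :=
  ((show Int.ModEq (2 ^ 32) (a % 2 ^ 32) a from Int.emod_emod_of_dvd a dvd_rfl).mul_right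
    101).add_right c

lemma pvModEq_stepA (a d c : Int) (w : Nat) :
    (a % 2 ^ 32 * 101 - d * (101 ^ w % 2 ^ 32) + c) % 2 ^ 32
      = (a * 101 - d * 101 ^ w + c) % 2 ^ 32 :=
  (((show Int.ModEq (2 ^ 32) (a % 2 ^ 32) a from Int.emod_emod_of_dvd a dvd_rfl).mul_right
      101).sub ((Int.ModEq.refl d).mul
        (show Int.ModEq (2 ^ 32) (101 ^ w % 2 ^ 32) (101 ^ w) from
          Int.emod_emod_of_dvd (101 ^ w) dvd_rfl))).add_right c

lemma pvModEq_stepB (a b c : Int) :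
    (a % 2 ^ 32 - b % 2 ^ 32 * (c % 2 ^ 32)) % 2 ^ 32 = (a - b * c) % 2 ^ 32 :=
  (show Int.ModEq (2 ^ 32) (a % 2 ^ 32) a from Int.emod_emod_of_dvd a dvd_rfl).sub
    ((show Int.ModEq (2 ^ 32) (b % 2 ^ 32) b from Int.emod_emod_of_dvd b dvd_rfl).mul
      (show Int.ModEq (2 ^ 32) (c % 2 ^ 32) c from Int.emod_emod_of_dvd c dvd_rfl))

-- the pure (un-modded) Horner value of the window of length n starting at s
def pvG (text : String) (s : Int) : Nat → Int
  | 0 => 0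
  | n + 1 => pvG text s n * 101 + pvOrd text (s + n)

-- A's seed loop computes the modded Horner hash of the first window
lemma pvSeed_eq (text : String) (s : Int) (w : Nat) :
    (PySem.List.pyRange 0 (w : Int) 1).foldl
        (fun h j => PySem.Int.mod (h * 101 + pvOrd text (s + j)) (2 ^ 32)) 0
      = pvG text s w % 2 ^ 32 := by
  induction w with
  | zero => simp [PySem.List.pyRange_one_eq_nil, pvG]
  | succ n ih =>
    rw [show ((n + 1 : Nat) : Int) = (n : Int) + 1 by push_cast; ring,
      PySem.List.pyRange_one_succ_right (by positivity), List.foldl_append]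
    simp only [List.foldl]
    rw [ih, pvMod_eq, pvModEq_seed]
    simp [pvG]

-- rolling identity on the pure Horner values
lemma pvG_roll (text : String) (s : Int) (w : Nat) :
    pvG text (s + 1) w = pvG text s w * 101 - pvOrd text s * 101 ^ w + pvOrd text (s + w) := by
  induction w with
  | zero => simp [pvG]
  | succ n ih =>
    have h1 : s + 1 + (n : Int) = s + ((n : Int) + 1) := by ring
    simp only [pvG, ih, pow_succ]
    rw [h1]
    push_cast
    ring

-- A's rolling step maps the hash of the window at s to the hash of the window at s+1
lemma pvStepA (text : String) (w : Nat) (s : Int) :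
    PySem.Int.mod
        (pvG text s w % 2 ^ 32 * 101
          - pvOrd text s * PySem.Int.powMod 101 w (2 ^ 32) + pvOrd text (s + w)) (2 ^ 32)
      = pvG text (s + 1) w % 2 ^ 32 := by
  have hp : PySem.Int.powMod 101 w (2 ^ 32) = 101 ^ w % 2 ^ 32 := by
    unfold PySem.Int.powMod; exact pvMod_eq _
  rw [hp, pvMod_eq, pvModEq_stepA, ← pvG_roll]

-- the whole rolling loop of A, unrolled from the right
lemma pvLoopA (text : String) (w : Nat) (n : Nat) (s : Int) (acc : List Int) :
    (PySem.List.pyRange (s + 1) (s + 1 + n) 1).foldl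
        (fun (st : List Int × Int) i =>
          let h := PySem.Int.mod
            (st.2 * 101 - pvOrd text (i - 1) * PySem.Int.powMod 101 w (2 ^ 32)
              + pvOrd text (i + w - 1)) (2 ^ 32)
          (st.1 ++ [h], h))
        (acc, pvG text s w % 2 ^ 32)
      = (acc ++ (PySem.List.pyRange (s + 1) (s + 1 + n) 1).map (fun i => pvG text i w % 2 ^ 32),
          pvG text (s + n) w % 2 ^ 32) := by
  induction n with
  | zero => simp [PySem.List.pyRange_one_eq_nil]
  | succ n ih =>
    rw [show (s + 1 + ((n + 1 : Nat) : Int)) = (s + 1 + (n : Nat)) + 1 by push_cast; ring,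
      PySem.List.pyRange_one_succ_right (by omega), List.foldl_append, ih]
    simp only [List.foldl, List.map_append, List.map]
    have h1 : s + 1 + (n : Int) - 1 = s + n := by ring
    have h2 : s + 1 + (n : Int) + (w : Int) - 1 = (s + (n : Int)) + (w : Int) := by ring
    have h3 : s + ((n : Int) + 1) = (s + (n : Int)) + 1 := by ring
    rw [h1, h2, show ((n + 1 : Nat) : Int) = (n : Int) + 1 from by push_cast; ring, h3,
      pvStepA text w (s + n)]
    simp [List.append_assoc, show s + 1 + (n : Int) = s + (n : Int) + 1 from by ring]

-- B's prefix loop builds the table of modded prefix-Horner hashes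
lemma pvPrefLoop (text : String) (n : Nat) :
    ((PySem.List.pyRange 0 (n : Int) 1).foldl
        (fun (st : List Int × Int) k =>
          let h := PySem.Int.mod (st.2 * 101 + pvOrd text k) (2 ^ 32)
          (st.1 ++ [h], h)) ([0], 0)).1
      = (PySem.List.pyRange 0 ((n : Int) + 1) 1).map (fun k => pvG text 0 k.toNat % 2 ^ 32) := by
  suffices h : ∀ m : Nat,
      (PySem.List.pyRange 0 (m : Int) 1).foldl
          (fun (st : List Int × Int) k =>
            let h := PySem.Int.mod (st.2 * 101 + pvOrd text k) (2 ^ 32)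
            (st.1 ++ [h], h)) ([0], 0)
        = ((PySem.List.pyRange 0 ((m : Int) + 1) 1).map (fun k => pvG text 0 k.toNat % 2 ^ 32),
            pvG text 0 m % 2 ^ 32) by
    rw [h n]
  intro m
  induction m with
  | zero =>
    rw [Nat.cast_zero, zero_add, PySem.List.pyRange_one_eq_nil le_rfl, List.foldl_nil,
      PySem.List.pyRange_one_cons (by norm_num), PySem.List.pyRange_one_eq_nil (by norm_num)]
    simp [pvG]
  | succ m ih =>
    rw [show ((m + 1 : Nat) : Int) = (m : Int) + 1 from by push_cast; ring,
      PySem.List.pyRange_one_succ_right (by positivity), List.foldl_append, ih]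
    simp only [List.foldl]
    rw [pvMod_eq, pvModEq_seed,
      PySem.List.pyRange_one_succ_right (a := 0) (b := (m : Int) + 1) (by positivity),
      List.map_append]
    simp [pvG, Int.toNat_of_nonneg, show (0 : Int) + (m : Int) = (m : Int) from by ring]

-- splitting a prefix-Horner value at position i
lemma pvG_split (text : String) (i w : Nat) :
    pvG text 0 (i + w) = pvG text 0 i * 101 ^ w + pvG text (i : Int) w := by
  induction w with
  | zero => simp [pvG]
  | succ n ih =>
    have h1 : (0 : Int) + ((i : Int) + (n : Int)) = (i : Int) + (n : Int) := by ring
    calc pvG text 0 (i + (n + 1))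
        = pvG text 0 (i + n) * 101 + pvOrd text (0 + ((i : Int) + (n : Int))) := by
          simp only [pvG, Nat.add_eq]; push_cast; ring_nf
      _ = pvG text 0 i * 101 ^ (n + 1) + (pvG text (i : Int) n * 101 + pvOrd text ((i : Int) + (n : Int))) := by
          rw [ih, h1, pow_succ]; ring
      _ = pvG text 0 i * 101 ^ (n + 1) + pvG text (i : Int) (n + 1) := by
          simp [pvG]

-- ===== VERDICT (by name: the statement is the Claim_ definition above) =====
theorem rolling_hash_spec : Claim_equal_rolling_hash := by
  intro text window_size _ hpre
  obtain ⟨h0, hle⟩ := hpre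
  unfold Spec_rolling_hash rolling_hash rolling_hash_alt
  dsimp only
  set W : Nat := window_size.toNat with hW
  have hw : (W : Int) = window_size := Int.toNat_of_nonneg h0
  set N : Nat := text.toList.length with hN
  have hlen : PySem.Str.len text = (N : Int) := by simp [PySem.Str.len_eq, hN]
  set K : Nat := (PySem.Str.len text - window_size).toNat with hK
  have hKi : (K : Int) = (N : Int) - window_size := by
    rw [hK, Int.toNat_of_nonneg (by omega), hlen]
  have hseed : (PySem.List.pyRange 0 window_size 1).foldl
      (fun h i => PySem.Int.mod (h * 101 + pvOrd text i) (2 ^ 32)) 0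
      = pvG text 0 W % 2 ^ 32 := by
    rw [← hw, ← pvSeed_eq text 0 W]
    simp only [zero_add]
  rw [hlen, hseed, pvPrefLoop text N,
    show (N : Int) - window_size + 1 = 1 + (K : Int) from by omega]
  -- A's rolling loop yields the per-window hashes
  have hA := pvLoopA text W K 0 [pvG text 0 W % 2 ^ 32]
  rw [hw] at hA
  simp only [zero_add] at hA
  rw [congrArg Prod.fst hA]
  -- B's prefix-difference formula yields the same per-window hashes
  have hmap : (PySem.List.pyRange 1 (1 + (K : Int)) 1).map
      (fun i => PySem.Int.mod
        (PySem.List.pyGetD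
            ((PySem.List.pyRange 0 ((N : Int) + 1) 1).map (fun k => pvG text 0 k.toNat % 2 ^ 32))
            (i + window_size) 0
          - PySem.List.pyGetD
              ((PySem.List.pyRange 0 ((N : Int) + 1) 1).map (fun k => pvG text 0 k.toNat % 2 ^ 32))
              i 0
            * PySem.Int.powMod 101 W (2 ^ 32)) (2 ^ 32))
      = (PySem.List.pyRange 1 (1 + (K : Int)) 1).map (fun i => pvG text i W % 2 ^ 32) := by
    apply List.map_congr_left
    intro i hi
    rw [PySem.List.mem_pyRange_one] at hi
    obtain ⟨hi0, hiK⟩ := hi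
    rw [PySem.List.pyGetD_map_pyRange_of_nonneg _ _ _ _ (by omega) (by omega),
      PySem.List.pyGetD_map_pyRange_of_nonneg _ _ _ _ (by omega) (by omega)]
    have hp : PySem.Int.powMod 101 W (2 ^ 32) = 101 ^ W % 2 ^ 32 := by
      unfold PySem.Int.powMod; exact pvMod_eq _
    have htn : (i + window_size).toNat = i.toNat + W := by omega
    have hti : ((i.toNat : Nat) : Int) = i := Int.toNat_of_nonneg (by omega)
    rw [pvMod_eq, hp, pvModEq_stepB, htn, pvG_split text i.toNat W, hti]
    ring_nf
  have hhead : PySem.Int.mod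
      (PySem.List.pyGetD
          ((PySem.List.pyRange 0 ((N : Int) + 1) 1).map (fun k => pvG text 0 k.toNat % 2 ^ 32))
          window_size 0
        - PySem.List.pyGetD
            ((PySem.List.pyRange 0 ((N : Int) + 1) 1).map (fun k => pvG text 0 k.toNat % 2 ^ 32))
            0 0
          * PySem.Int.powMod 101 W (2 ^ 32)) (2 ^ 32)
      = pvG text 0 W % 2 ^ 32 := by
    rw [PySem.List.pyGetD_map_pyRange_of_nonneg _ _ _ _ (by omega) (by omega),
      PySem.List.pyGetD_map_pyRange_of_nonneg _ _ _ _ (by omega) (by omega),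
      show PySem.Int.powMod 101 W (2 ^ 32) = 101 ^ W % 2 ^ 32 from pvMod_eq _,
      pvMod_eq, pvModEq_stepB]
    simp [pvG, hW]
  rw [hmap, hhead]
  simp
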